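-- pv_equiv track=rewrite | github.com/Python-programming-basics/n-elnurabdullayev283-lab | ELNUR BEY.py | fix_identifiers
-- ===== SOURCE A (Python) =====
-- def fix_identifiers(input_string):
--     identifiers = input_string.split()
--     seen = {}
--     result = []
--
--     for ident in identifiers:
--         if ident not in seen:
--             seen[ident] = 0
--             result.append(ident)
--         else:
--             seen[ident] += 1
--             result.append(f"{ident}_{seen[ident]}")
--
--     return ' '.join(result)
-- ===== SOURCE B (Python) =====
-- def fix_identifiers(input_string):
--     identifiers = input_string.split()
--     out = [None] * len(identifiers)
--     for token in dict.fromkeys(identifiers):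
--         positions = [i for i, t in enumerate(identifiers) if t == token]
--         for k, i in enumerate(positions):
--             out[i] = token if k == 0 else f"{token}_{k}"
--     return ' '.join(out)
-- ===== Notes on version B (the rewrite author's own statement) =====
-- stated objective: alternative
-- what changed: Replaces A's single left-to-right pass with a running seen-counter dict by a group-and-scatter algorithm: pre-size an output slot list, group all positions by distinct token (dict.fromkeys order), number each token's occurrences by enumerating its own position list, and write the renamed pieces back into their slots.
import Mathlib
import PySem

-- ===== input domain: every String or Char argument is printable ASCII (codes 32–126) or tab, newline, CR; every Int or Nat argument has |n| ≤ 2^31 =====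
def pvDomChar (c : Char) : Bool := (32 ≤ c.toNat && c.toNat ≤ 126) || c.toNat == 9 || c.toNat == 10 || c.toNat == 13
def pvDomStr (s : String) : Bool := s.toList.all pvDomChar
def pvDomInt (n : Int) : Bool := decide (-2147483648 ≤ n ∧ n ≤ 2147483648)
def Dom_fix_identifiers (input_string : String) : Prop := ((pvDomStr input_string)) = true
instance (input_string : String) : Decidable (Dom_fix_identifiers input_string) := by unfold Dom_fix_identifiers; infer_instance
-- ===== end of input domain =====

-- B replaces A's single pass with a running counter dict by group-and-scatter: pre-size an output
-- slot list, group positions by distinct token, number each token's occurrences by enumerating its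
-- position list, write renamed pieces into their slots (alternative decomposition, not faster).


-- ===== PORT A =====
-- A: split, then one pass keeping a dict 'seen' (ident ↦ repetitions so far) and a result list.
def fix_identifiers (input_string : String) : String :=
  let identifiers := PySem.Chars.split₀ input_string.toList
  let st := identifiers.foldl
    (fun (st : PySem.Dict (List Char) Int × List (List Char)) ident =>
      match st.1.get? ident with
      | none   => (st.1.insert ident 0, st.2 ++ [ident])
      | some v => (st.1.insert ident (v + 1), st.2 ++ [ident ++ '_' :: PySem.Int.toChars (v + 1)]))
    (PySem.Dict.empty, [])
  String.ofList (PySem.Chars.join [' '] st.2)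

-- ===== PORT B =====
-- B: group-and-scatter. out = [None]*n; for each distinct token (dict.fromkeys = PySem.List.dedup)
-- collect its positions, enumerate them (k = occurrence number), write the renamed piece at each
-- position (indices are nonnegative, so out[i] = … is .set i.toNat).
def fix_identifiers_alt (input_string : String) : String :=
  let identifiers := PySem.Chars.split₀ input_string.toList
  let out : List (Option (List Char)) := List.replicate identifiers.length none
  let out := (PySem.List.dedup identifiers).foldl
    (fun (out : List (Option (List Char))) token =>
      let positions := ((PySem.List.enumerate identifiers).filter (fun p => p.2 == token)).map (fun p => p.1)
      (PySem.List.enumerate positions).foldl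
        (fun out p =>
          out.set p.2.toNat (some (if p.1 == 0 then token else token ++ '_' :: PySem.Int.toChars p.1)))
        out)
    out
  String.ofList (PySem.Chars.join [' '] (out.map (fun o => o.getD [])))

-- ===== PRECONDITION & SPEC =====
def Spec_fix_identifiers (input_string : String) (out : String) : Prop := out = fix_identifiers_alt input_string
instance (input_string : String) (out : String) : Decidable (Spec_fix_identifiers input_string out) := by unfold Spec_fix_identifiers; infer_instance

-- ===== CLAIM (what is proved, stated in full; the proofs are below) =====
def Claim_equal_fix_identifiers : Prop := ∀ (input_string : String), Dom_fix_identifiers input_string → Spec_fix_identifiers input_string (fix_identifiers input_string)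

-- ===== LEMMAS AND PROOFS =====

-- The renamed piece for the occurrence with k earlier occurrences.
def pvPiece (t : List Char) (k : Nat) : List Char :=
  if k = 0 then t else t ++ '_' :: PySem.Int.toChars (k : Int)

-- Canonical form of the renamed pieces: process 'rest' knowing the already-seen prefix 'pre'.
def pvGo (pre : List (List Char)) : List (List Char) → List (List Char)
  | [] => []
  | x :: xs => pvPiece x (pre.count x) :: pvGo (pre ++ [x]) xs

-- A's dict invariant: 'seen' stores (occurrences in the processed prefix) - 1.
def pvInv (seen : PySem.Dict (List Char) Int) (pre : List (List Char)) : Prop :=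
  ∀ x, seen.get? x = if pre.count x = 0 then none else some ((pre.count x : Int) - 1)

theorem pvA_eq_go (rest : List (List Char)) :
    ∀ (pre : List (List Char)) (seen : PySem.Dict (List Char) Int) (acc : List (List Char)),
    pvInv seen pre →
    (rest.foldl
      (fun (st : PySem.Dict (List Char) Int × List (List Char)) ident =>
        match st.1.get? ident with
        | none   => (st.1.insert ident 0, st.2 ++ [ident])
        | some v => (st.1.insert ident (v + 1), st.2 ++ [ident ++ '_' :: PySem.Int.toChars (v + 1)]))
      (seen, acc)).2 = acc ++ pvGo pre rest := by
  induction rest with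
  | nil => intro pre seen acc _; simp [pvGo]
  | cons x xs ih =>
    intro pre seen acc hinv
    have hx := hinv x
    by_cases h0 : pre.count x = 0
    · simp [h0] at hx
      have hstep : (xs.foldl
          (fun (st : PySem.Dict (List Char) Int × List (List Char)) ident =>
            match st.1.get? ident with
            | none   => (st.1.insert ident 0, st.2 ++ [ident])
            | some v => (st.1.insert ident (v + 1), st.2 ++ [ident ++ '_' :: PySem.Int.toChars (v + 1)]))
          (seen.insert x 0, acc ++ [x])).2 = (acc ++ [x]) ++ pvGo (pre ++ [x]) xs := by
        apply ih
        intro y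
        rw [PySem.Dict.get?_insert]
        by_cases hy : y = x
        · subst hy; simp [List.count_append, h0]
        · have hxy : x ≠ y := fun h => hy h.symm
          simp [hinv y, List.count_append, hxy, hy]
      simp only [List.foldl_cons, hx]
      rw [hstep]
      simp [pvGo, pvPiece, h0]
    · simp only [if_neg h0] at hx
      have hstep : (xs.foldl
          (fun (st : PySem.Dict (List Char) Int × List (List Char)) ident =>
            match st.1.get? ident with
            | none   => (st.1.insert ident 0, st.2 ++ [ident])
            | some v => (st.1.insert ident (v + 1), st.2 ++ [ident ++ '_' :: PySem.Int.toChars (v + 1)]))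
          (seen.insert x (((pre.count x : Int) - 1) + 1),
           acc ++ [x ++ '_' :: PySem.Int.toChars (((pre.count x : Int) - 1) + 1)])).2
          = (acc ++ [x ++ '_' :: PySem.Int.toChars (((pre.count x : Int) - 1) + 1)]) ++ pvGo (pre ++ [x]) xs := by
        apply ih
        intro y
        rw [PySem.Dict.get?_insert]
        by_cases hy : y = x
        · subst hy
          have hc : (pre ++ [y]).count y = pre.count y + 1 := by simp [List.count_append]
          simp only [hc]
          simp
        · have hxy : x ≠ y := fun h => hy h.symm
          simp [hinv y, List.count_append, hxy, hy]
      simp only [List.foldl_cons, hx]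
      rw [hstep]
      have : ((pre.count x : Int) - 1) + 1 = (pre.count x : Int) := by ring
      simp [pvGo, pvPiece, h0, this]

-- Positional characterization of pvGo.
theorem pvGo_getElem? (rest : List (List Char)) :
    ∀ (pre : List (List Char)) (j : Nat),
    (pvGo pre rest)[j]? = (rest[j]?).map (fun x => pvPiece x ((pre ++ rest.take j).count x)) := by
  induction rest with
  | nil => intro pre j; simp [pvGo]
  | cons x xs ih =>
    intro pre j
    cases j with
    | zero => simp [pvGo]
    | succ j' =>
      simp only [pvGo, List.getElem?_cons_succ, List.take_succ_cons]
      rw [ih (pre ++ [x]) j']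
      congr 1
      funext y
      congr 2
      simp

-- The positions of token t in ids, as B computes them.
def pvPos (ids : List (List Char)) (t : List Char) (base : Int) : List Int :=
  ((PySem.List.enumerate ids base).filter (fun p => p.2 == t)).map (fun p => p.1)

theorem pvPos_nil (t : List Char) (base : Int) : pvPos [] t base = [] := by
  simp [pvPos, PySem.List.enumerate_nil]

theorem pvPos_cons (x : List Char) (r : List (List Char)) (t : List Char) (base : Int) :
    pvPos (x :: r) t base =
      if x = t then base :: pvPos r t (base + 1) else pvPos r t (base + 1) := by
  by_cases h : x = t <;> simp [pvPos, PySem.List.enumerate_cons, h]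

-- Scatter-writing preserves the slot list's length.
theorem pvFold_set_length (L : List (Int × Int)) (t : List Char) :
    ∀ (out : List (Option (List Char))),
    (L.foldl (fun out p =>
        out.set p.2.toNat (some (if p.1 == 0 then t else t ++ '_' :: PySem.Int.toChars p.1))) out).length
      = out.length := by
  induction L with
  | nil => intro out; rfl
  | cons p L ih => intro out; rw [List.foldl_cons, ih]; simp

-- Inner loop: writing token t's pieces fills exactly t's slots with the occurrence-numbered pieces.
theorem pvInner (xs : List (List Char)) :
    ∀ (t : List Char) (base k0 : Nat) (out : List (Option (List Char))),
    base + xs.length ≤ out.length →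
    ∀ (j : Nat),
    ((PySem.List.enumerate (pvPos xs t (base : Int)) (k0 : Int)).foldl
      (fun out p =>
        out.set p.2.toNat (some (if p.1 == 0 then t else t ++ '_' :: PySem.Int.toChars p.1))) out)[j]?
    = if base ≤ j ∧ j - base < xs.length ∧ xs[j - base]? = some t
      then some (some (pvPiece t (k0 + (xs.take (j - base)).count t)))
      else out[j]? := by
  induction xs with
  | nil =>
    intro t base k0 out _ j
    rw [pvPos_nil, PySem.List.enumerate_nil]
    simp
  | cons x r ih =>
    intro t base k0 out hlen j
    by_cases hxt : x = t
    · subst hxt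
      rw [pvPos_cons, if_pos rfl, PySem.List.enumerate_cons, List.foldl_cons]
      simp only [Int.toNat_natCast]
      have hval : (if ((k0 : Nat) : Int) == 0 then x else x ++ '_' :: PySem.Int.toChars ((k0 : Nat) : Int)) = pvPiece x k0 := by
        by_cases hk : k0 = 0 <;> simp [pvPiece, hk]
      rw [hval]
      have hb : ((base : Nat) : Int) + 1 = (((base + 1 : Nat)) : Int) := by push_cast; ring
      have hk1 : ((k0 : Nat) : Int) + 1 = (((k0 + 1 : Nat)) : Int) := by push_cast; ring
      rw [hb, hk1,
        ih x (base + 1) (k0 + 1) (out.set base (some (pvPiece x k0)))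
          (by simp only [List.length_set]; simp at hlen ⊢; omega) j]
      rcases lt_trichotomy j base with hj | hj | hj
      · rw [if_neg (by omega), if_neg (by omega), List.getElem?_set_ne (by omega)]
      · subst hj
        rw [if_neg (by omega), if_pos ⟨le_refl _, by simp, by simp⟩,
          List.getElem?_set_self (by simp at hlen; omega)]
        simp [pvPiece]
      · obtain ⟨m, rfl⟩ : ∃ m, j = base + 1 + m := ⟨j - base - 1, by omega⟩
        have h1 : base + 1 + m - (base + 1) = m := by omega
        have h2 : base + 1 + m - base = m + 1 := by omega
        rw [h1, h2]
        simp only [List.getElem?_cons_succ, List.take_succ_cons, List.length_cons,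
          List.count_cons_self]
        by_cases hc : m < r.length ∧ r[m]? = some x
        · rw [if_pos ⟨by omega, hc.1, hc.2⟩, if_pos ⟨by omega, by have := hc.1; omega, hc.2⟩]
          have harith : k0 + 1 + List.count x (List.take m r) = k0 + (List.count x (List.take m r) + 1) := by omega
          rw [harith]
        · rw [if_neg (by intro h; exact hc ⟨h.2.1, h.2.2⟩),
            if_neg (by intro h; exact hc ⟨by omega, h.2.2⟩),
            List.getElem?_set_ne (by omega)]
    · rw [pvPos_cons, if_neg hxt]
      have hb : ((base : Nat) : Int) + 1 = (((base + 1 : Nat)) : Int) := by push_cast; ring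
      rw [hb, ih t (base + 1) k0 out (by simp at hlen ⊢; omega) j]
      rcases lt_trichotomy j base with hj | hj | hj
      · rw [if_neg (by omega), if_neg (by omega)]
      · subst hj
        rw [if_neg (by omega), if_neg (by simp [hxt])]
      · obtain ⟨m, rfl⟩ : ∃ m, j = base + 1 + m := ⟨j - base - 1, by omega⟩
        have h1 : base + 1 + m - (base + 1) = m := by omega
        have h2 : base + 1 + m - base = m + 1 := by omega
        rw [h1, h2]
        simp only [List.getElem?_cons_succ, List.take_succ_cons, List.length_cons]
        by_cases hc : m < r.length ∧ r[m]? = some t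
        · rw [if_pos ⟨by omega, hc.1, hc.2⟩, if_pos ⟨by omega, by have := hc.1; omega, hc.2⟩]
          simp [hxt]
        · rw [if_neg (by intro h; exact hc ⟨h.2.1, h.2.2⟩),
            if_neg (by intro h; exact hc ⟨by omega, h.2.2⟩)]

-- Outer loop over the distinct tokens.
theorem pvOuter (ids : List (List Char)) (ds : List (List Char)) :
    ∀ (out : List (Option (List Char))), out.length = ids.length →
    ∀ (j : Nat) (v : List Char), ids[j]? = some v →
    ((ds.foldl
      (fun (out : List (Option (List Char))) token =>
        (PySem.List.enumerate
            (((PySem.List.enumerate ids).filter (fun p => p.2 == token)).map (fun p => p.1))).foldl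
          (fun out p =>
            out.set p.2.toNat (some (if p.1 == 0 then token else token ++ '_' :: PySem.Int.toChars p.1)))
          out)
      out)[j]?)
    = if v ∈ ds then some (some (pvPiece v ((ids.take j).count v))) else out[j]? := by
  induction ds with
  | nil => intro out _ j v _; simp
  | cons t rest ih =>
    intro out hlen j v hv
    rw [List.foldl_cons]
    have hstep := pvInner ids t 0 0 out (by omega)
    simp only [Nat.cast_zero, Nat.sub_zero, Nat.zero_add, Nat.zero_le, true_and, pvPos] at hstep
    rw [ih _ (by rw [pvFold_set_length]; exact hlen) j v hv]
    have hj : j < ids.length := by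
      by_contra h
      rw [List.getElem?_eq_none (by omega)] at hv
      simp at hv
    by_cases hvr : v ∈ rest
    · simp [hvr]
    · by_cases hvt : v = t
      · subst hvt
        rw [if_neg hvr, hstep j, if_pos ⟨hj, hv⟩, if_pos (List.mem_cons_self)]
      · rw [if_neg hvr, hstep j,
          if_neg (by intro h; rw [h.2] at hv; exact hvt (Option.some.inj hv).symm),
          if_neg (by simp [hvt, hvr])]

-- The outer fold preserves the slot list's length.
theorem pvOuterLen (ids : List (List Char)) (ds : List (List Char)) :
    ∀ (out : List (Option (List Char))),
    (ds.foldl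
      (fun (out : List (Option (List Char))) token =>
        (PySem.List.enumerate
            (((PySem.List.enumerate ids).filter (fun p => p.2 == token)).map (fun p => p.1))).foldl
          (fun out p =>
            out.set p.2.toNat (some (if p.1 == 0 then token else token ++ '_' :: PySem.Int.toChars p.1)))
          out)
      out).length = out.length := by
  induction ds with
  | nil => intro out; rfl
  | cons t rest ih => intro out; rw [List.foldl_cons, ih, pvFold_set_length]

-- B's filled slot list is exactly the canonical renamed list.
theorem pvB_slots (ids : List (List Char)) :
    (((PySem.List.dedup ids).foldl
      (fun (out : List (Option (List Char))) token =>
        (PySem.List.enumerate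
            (((PySem.List.enumerate ids).filter (fun p => p.2 == token)).map (fun p => p.1))).foldl
          (fun out p =>
            out.set p.2.toNat (some (if p.1 == 0 then token else token ++ '_' :: PySem.Int.toChars p.1)))
          out)
      (List.replicate ids.length none)).map (fun o => o.getD [])) = pvGo [] ids := by
  apply List.ext_getElem?
  intro j
  rw [List.getElem?_map, pvGo_getElem? ids [] j]
  by_cases hj : j < ids.length
  · obtain ⟨v, hv⟩ : ∃ v, ids[j]? = some v := ⟨ids[j], List.getElem?_eq_getElem hj⟩
    rw [pvOuter ids (PySem.List.dedup ids) (List.replicate ids.length none) (by simp) j v hv,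
      if_pos ((PySem.List.mem_dedup _ _).mpr (List.mem_of_getElem? hv))]
    simp [hv]
  · rw [List.getElem?_eq_none (le_of_not_gt (by rw [pvOuterLen]; simpa using hj)),
      List.getElem?_eq_none (le_of_not_gt (by simpa using hj))]
    rfl

-- ===== VERDICT (by name: the statement is the Claim_ definition above) =====
theorem fix_identifiers_spec : Claim_equal_fix_identifiers := by
  intro s _
  unfold Spec_fix_identifiers
  simp only [fix_identifiers, fix_identifiers_alt]
  rw [pvA_eq_go (PySem.Chars.split₀ s.toList) [] PySem.Dict.empty []
      (fun x => by simp [PySem.Dict.get?_empty]),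
    pvB_slots (PySem.Chars.split₀ s.toList)]
  simp
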